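-- pv_equiv track=rewrite | github.com/tarako0/guitar_app | guitar.py | dosu
-- ===== SOURCE A (Python) =====
-- def dosu(root,x):
--     Rdic1={'C':0,'C#':1,'D':2,'D#':3,'E':4,'F':5,'F#':6,'G':7,'G#':8,'A':9,'A#':10,'B':11}
--     Rdic2={0:'R',1:'b9',2:'9',3:'m3',4:'M3',5:'p4',6:'b5',7:'p5',8:'aug',9:'6',10:'7',11:'M7'}
--     Rdic_re={}
--     for i in Rdic1:
--         if i==root:
--             root_number=Rdic1[i]
--     for i in Rdic1:
--         if Rdic1[i]-root_number>=0:
--             Rdic_re[i]=Rdic2[Rdic1[i]-root_number]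
--         elif Rdic1[i]-root_number<0:
--             Rdic_re[i]=Rdic2[Rdic1[i]-root_number+12]
--     return Rdic_re[x]
-- ===== SOURCE B (Python) =====
-- def dosu(root, x):
--     # Parse each note structurally: a note is one letter C..B plus an optional '#'
--     # (the sharp adds one semitone). Name the semitone difference mod 12 with a
--     # branch chain. No note table, no table scan.
--     def pitch(note):
--         if len(note) == 1:
--             sharp = 0
--         elif len(note) == 2 and note[1] == '#':
--             sharp = 1
--         else:
--             raise ValueError('not a note: %r' % (note,))
--         c = note[0]
--         if c == 'C':
--             b = 0
--         elif c == 'D':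
--             b = 2
--         elif c == 'E':
--             b = 4
--         elif c == 'F':
--             b = 5
--         elif c == 'G':
--             b = 7
--         elif c == 'A':
--             b = 9
--         elif c == 'B':
--             b = 11
--         else:
--             raise ValueError('not a note: %r' % (note,))
--         return b + sharp
--
--     d = (pitch(x) - pitch(root)) % 12
--     if d == 0:
--         return 'R'
--     if d == 1:
--         return 'b9'
--     if d == 2:
--         return '9'
--     if d == 3:
--         return 'm3'
--     if d == 4:
--         return 'M3'
--     if d == 5:
--         return 'p4'
--     if d == 6:
--         return 'b5'
--     if d == 7:
--         return 'p5'
--     if d == 8: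
--         return 'aug'
--     if d == 9:
--         return '6'
--     if d == 10:
--         return '7'
--     return 'M7'
-- ===== Notes on version B (the rewrite author's own statement) =====
-- stated objective: alternative
-- what changed: Replaces A's table-driven approach (scan a 12-note dict for the root, then build a full 12-entry shifted interval dict and index it by x) with structural parsing of each note string (letter gives the natural-scale semitone, a trailing '#' adds one) and a branch chain naming the semitone difference mod 12; no note table or scan remains.
import Mathlib
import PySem

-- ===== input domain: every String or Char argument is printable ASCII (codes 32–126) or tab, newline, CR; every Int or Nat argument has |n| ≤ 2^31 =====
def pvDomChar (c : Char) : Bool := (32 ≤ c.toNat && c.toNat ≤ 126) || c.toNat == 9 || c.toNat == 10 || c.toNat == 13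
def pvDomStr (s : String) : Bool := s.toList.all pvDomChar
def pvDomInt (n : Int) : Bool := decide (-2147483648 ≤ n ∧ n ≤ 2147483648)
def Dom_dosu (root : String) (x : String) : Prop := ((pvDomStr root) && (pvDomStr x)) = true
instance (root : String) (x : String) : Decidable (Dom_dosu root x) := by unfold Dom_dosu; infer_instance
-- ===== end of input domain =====

-- B parses each note structurally (letter + optional '#') and names the semitone difference with a branch chain, instead of A's scan-and-build over two note dicts; equal on all 12 valid note names (Pre_ excludes inputs where A raises).


-- ===== PORT A =====
def dosuRdic1 : PySem.Dict String Int :=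
  PySem.Dict.ofList [("C",0),("C#",1),("D",2),("D#",3),("E",4),("F",5),("F#",6),("G",7),("G#",8),("A",9),("A#",10),("B",11)]

def dosuRdic2 : PySem.Dict Int String :=
  PySem.Dict.ofList [(0,"R"),(1,"b9"),(2,"9"),(3,"m3"),(4,"M3"),(5,"p4"),(6,"b5"),(7,"p5"),(8,"aug"),(9,"6"),(10,"7"),(11,"M7")]

def dosu (root : String) (x : String) : String :=
  -- first loop: for i in Rdic1: if i == root: root_number = Rdic1[i]   (none = UnboundLocalError, excluded by Pre_)
  let rootNumber? : Option Int :=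
    dosuRdic1.keys.foldl (fun acc i => if i == root then some (dosuRdic1.getD i 0) else acc) none
  match rootNumber? with
  | none => ""
  | some rn =>
    -- second loop: build Rdic_re
    let re : PySem.Dict String String :=
      dosuRdic1.keys.foldl (fun d i =>
        if dosuRdic1.getD i 0 - rn ≥ 0 then
          d.insert i ((dosuRdic2.get? (dosuRdic1.getD i 0 - rn)).getD "")
        else
          d.insert i ((dosuRdic2.get? (dosuRdic1.getD i 0 - rn + 12)).getD ""))
        (PySem.Dict.ofList ([] : List (String × String)))
    -- return Rdic_re[x]   (none = KeyError, excluded by Pre_)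
    (re.get? x).getD ""

-- ===== PORT B =====
-- pitch(note): one letter C..B plus an optional '#'; none = ValueError (excluded by Pre_)
def dosuPitch (note : String) : Option Int :=
  let sharp? : Option Int :=
    if PySem.Str.len note == 1 then some 0
    else if PySem.Str.len note == 2 && PySem.Str.pyGet? note 1 == some '#' then some 1
    else none
  match sharp?, PySem.Str.pyGet? note 0 with
  | some sharp, some c =>
    if c == 'C' then some (0 + sharp)
    else if c == 'D' then some (2 + sharp)
    else if c == 'E' then some (4 + sharp)
    else if c == 'F' then some (5 + sharp)
    else if c == 'G' then some (7 + sharp)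
    else if c == 'A' then some (9 + sharp)
    else if c == 'B' then some (11 + sharp)
    else none
  | _, _ => none

def dosu_alt (root : String) (x : String) : String :=
  match dosuPitch x, dosuPitch root with
  | some px, some pr =>
  let d := PySem.Int.mod (px - pr) 12
  if d == 0 then "R"
  else if d == 1 then "b9"
  else if d == 2 then "9"
  else if d == 3 then "m3"
  else if d == 4 then "M3"
  else if d == 5 then "p4"
  else if d == 6 then "b5"
  else if d == 7 then "p5"
  else if d == 8 then "aug"
  else if d == 9 then "6"
  else if d == 10 then "7"
  else "M7"
  | _, _ => ""  -- ValueError, excluded by Pre_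

-- ===== PRECONDITION & SPEC =====
-- Pre_ excludes exactly the inputs where A raises: root not a note name (UnboundLocalError) or x not a note name (KeyError).
def Pre_dosu (root : String) (x : String) : Prop :=
  root ∈ ["C","C#","D","D#","E","F","F#","G","G#","A","A#","B"] ∧
  x ∈ ["C","C#","D","D#","E","F","F#","G","G#","A","A#","B"]
instance (root : String) (x : String) : Decidable (Pre_dosu root x) := by unfold Pre_dosu; infer_instance
def pvWitness_dosu : String × String := ("D", "A#")

def pvRaiseWitness_dosu : String × String := ("C", "E#")
def pvRaiseWitnessOut_dosu : String := "p4"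

def Spec_dosu (root : String) (x : String) (out : String) : Prop := out = dosu_alt root x
instance (root : String) (x : String) (out : String) : Decidable (Spec_dosu root x out) := by unfold Spec_dosu; infer_instance

-- ===== CLAIM =====
def Claim_equal_dosu : Prop := ∀ (root : String) (x : String), Dom_dosu root x → Pre_dosu root x → Spec_dosu root x (dosu root x)

-- ===== LEMMAS AND PROOFS =====

-- ===== VERDICT =====
theorem dosu_spec : Claim_equal_dosu := by
  intro root x _ hp
  obtain ⟨hr, hx⟩ := hp
  simp only [List.mem_cons, List.not_mem_nil, or_false] at hr hx
  rcases hr with rfl|rfl|rfl|rfl|rfl|rfl|rfl|rfl|rfl|rfl|rfl|rfl <;>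
    rcases hx with rfl|rfl|rfl|rfl|rfl|rfl|rfl|rfl|rfl|rfl|rfl|rfl <;> decide
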